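-- pv_equiv track=rewrite | github.com/leeminkyu1212/Algorithm | 프로그래머스/2/169199. 리코쳇 로봇/리코쳇 로봇.py | solution
-- ===== SOURCE A (Python) =====
-- from collections import deque
--
-- def solution(board):
--     rows, cols = len(board), len(board[0])
--
--     start = goal = None
--     for i in range(rows):
--         for j in range(cols):
--             if board[i][j] == 'R':
--                 start = (i, j)
--             elif board[i][j] == 'G':
--                 goal = (i, j)
--
--     directions = [(-1, 0), (1, 0), (0, -1), (0, 1)]
--     queue = deque([(start[0], start[1], 0)])
--     visited = set()
--     visited.add(start)
--
--     while queue: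
--         x, y, moves = queue.popleft()
--
--         if (x, y) == goal:
--             return moves
--
--         for dx, dy in directions:
--             nx, ny = x, y
--
--             while 0 <= nx + dx < rows and 0 <= ny + dy < cols and board[nx + dx][ny + dy] != 'D':
--                 nx += dx
--                 ny += dy
--
--             if (nx, ny) not in visited:
--                 visited.add((nx, ny))
--                 queue.append((nx, ny, moves + 1))
--
--     return -1
-- ===== SOURCE B (Python) =====
-- def solution(board):
--     rows, cols = len(board), len(board[0])
--
--     start = goal = None
--     for i in range(rows):
--         for j in range(cols):
--             if board[i][j] == 'R':
--                 start = (i, j)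
--             elif board[i][j] == 'G':
--                 goal = (i, j)
--
--     def slide(i, j, di, dj):
--         while 0 <= i + di < rows and 0 <= j + dj < cols and board[i + di][j + dj] != 'D':
--             i += di
--             j += dj
--         return (i, j)
--
--     # Bellman-Ford style fixpoint: dist maps each reached cell to its exact
--     # shortest move count; one relaxation round per distance level, stop at the
--     # first round that discovers no new cell.
--     dist = {start: 0}
--     while True:
--         new = dict(dist)
--         for (i, j), d in dist.items():
--             for di, dj in ((-1, 0), (1, 0), (0, -1), (0, 1)):
--                 t = slide(i, j, di, dj)
--                 if t not in new or d + 1 < new[t]: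
--                     new[t] = d + 1
--         if len(new) == len(dist):
--             return new.get(goal, -1)
--         dist = new
-- ===== Notes on version B (the rewrite author's own statement) =====
-- stated objective: alternative
-- what changed: Replaces BFS with a queue and visited set by Bellman-Ford-style fixpoint iteration: a distance dictionary is repeatedly relaxed (one whole-table relaxation round per level) until a round adds no new cell, then the goal's distance is read off.
import Mathlib
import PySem

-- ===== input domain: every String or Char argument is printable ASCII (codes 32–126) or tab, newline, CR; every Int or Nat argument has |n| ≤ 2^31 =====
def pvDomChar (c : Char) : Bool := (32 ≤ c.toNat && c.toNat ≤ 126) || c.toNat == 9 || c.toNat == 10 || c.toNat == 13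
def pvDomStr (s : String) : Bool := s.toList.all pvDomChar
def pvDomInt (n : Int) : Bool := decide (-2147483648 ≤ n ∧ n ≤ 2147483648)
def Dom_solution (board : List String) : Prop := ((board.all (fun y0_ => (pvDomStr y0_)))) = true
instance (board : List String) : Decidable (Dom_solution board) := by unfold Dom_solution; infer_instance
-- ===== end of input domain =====

-- B replaces A's BFS (queue + visited set) by Bellman-Ford-style fixpoint iteration on a distance
-- dictionary, relaxed round by round until a round adds no new cell ("alternative", not faster).
-- Return-value equivalence only.

-- ===== PORT A =====
-- shared helpers: board[i][j], the sliding while-loop and the start/goal scan occur verbatim in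
-- both Pythons, so A and B share these transliterations.
def pvCharAt (board : List String) (i j : Int) : Option Char :=
  (PySem.List.pyGet? board i).bind (fun row => PySem.Str.pyGet? row j)

-- the inner `while 0 <= nx+dx < rows and 0 <= ny+dy < cols and board[nx+dx][ny+dy] != 'D'` loop;
-- fuel (rows+cols).toNat bounds its steps (a slide moves one cell per step and stays inside the grid)
def pvSlide (board : List String) (rows cols dx dy : Int) : Nat → Int × Int → Int × Int
  | 0, p => p
  | f + 1, (nx, ny) =>
    if 0 ≤ nx + dx ∧ nx + dx < rows ∧ 0 ≤ ny + dy ∧ ny + dy < cols ∧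
        pvCharAt board (nx + dx) (ny + dy) ≠ some 'D' then
      pvSlide board rows cols dx dy f (nx + dx, ny + dy)
    else (nx, ny)

-- `for i in range(rows): for j in range(cols): …` locating R (start) and G (goal), last hit wins
def pvScanCell (board : List String) (i : Int)
    (sg : Option (Int × Int) × Option (Int × Int)) (j : Int) :
    Option (Int × Int) × Option (Int × Int) :=
  if pvCharAt board i j = some 'R' then (some (i, j), sg.2)
  else if pvCharAt board i j = some 'G' then (sg.1, some (i, j))
  else sg

def pvScanRow (board : List String) (cols : Int)
    (sg : Option (Int × Int) × Option (Int × Int)) (i : Int) :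
    Option (Int × Int) × Option (Int × Int) :=
  (PySem.List.pyRange 0 cols 1).foldl (pvScanCell board i) sg

def pvScan (board : List String) (rows cols : Int) :
    Option (Int × Int) × Option (Int × Int) :=
  (PySem.List.pyRange 0 rows 1).foldl (pvScanRow board cols) (none, none)

def pvDirs : List (Int × Int) := [(-1, 0), (1, 0), (0, -1), (0, 1)]

-- A's `for dx, dy in directions:` body: slide, and if unvisited mark visited and append to the queue
def pvStepA (board : List String) (rows cols x y m : Int)
    (qv : List (Int × Int × Int) × PySem.Set (Int × Int)) (d : Int × Int) :
    List (Int × Int × Int) × PySem.Set (Int × Int) :=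
  let p := pvSlide board rows cols d.1 d.2 ((rows + cols).toNat) (x, y)
  if p ∈ qv.2 then qv else (qv.1 ++ [(p.1, p.2, m + 1)], PySem.Set.add qv.2 p)

-- A's `while queue:` loop; fuel bounds the number of pops (each pop enqueues only fresh cells,
-- so 2*rows*cols+1 pops suffice); the empty-queue exit is checked before fuel
def pvLoopA (board : List String) (rows cols : Int) (goal : Option (Int × Int))
    (fuel : Nat) (queue : List (Int × Int × Int)) (vis : PySem.Set (Int × Int)) : Int :=
  match queue with
  | [] => -1
  | (x, y, m) :: rest =>
    if some (x, y) = goal then m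
    else
      match fuel with
      | 0 => -1
      | f + 1 =>
        let qv := pvDirs.foldl (pvStepA board rows cols x y m) (rest, vis)
        pvLoopA board rows cols goal f qv.1 qv.2

def solution (board : List String) : Int :=
  let rows : Int := (board.length : Int)
  match PySem.List.pyGet? board 0 with
  | none => -1  -- Python raises IndexError at board[0]; outside Pre_solution
  | some row0 =>
    let cols : Int := (PySem.Str.len row0 : Int)
    let sg := pvScan board rows cols
    match sg.1 with
    | none => -1  -- Python raises TypeError (start is None); outside Pre_solution
    | some s =>
      pvLoopA board rows cols sg.2 (2 * (rows.toNat * cols.toNat) + 1)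
        [(s.1, s.2, 0)] (PySem.Set.add PySem.Set.empty (s.1, s.2))

-- ===== PORT B =====
-- B's relaxation of one slide target: `if t not in new or d + 1 < new[t]: new[t] = d + 1`
def pvRelax (board : List String) (rows cols : Int) (c : Int × Int) (du : Int)
    (new : PySem.Dict (Int × Int) Int) (d : Int × Int) : PySem.Dict (Int × Int) Int :=
  let t := pvSlide board rows cols d.1 d.2 ((rows + cols).toNat) c
  match new.get? t with
  | none => new.insert t (du + 1)
  | some v => if du + 1 < v then new.insert t (du + 1) else new

-- B's `new = dict(dist); for (i, j), d in dist.items(): for di, dj in …` relaxation round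
def pvRound (board : List String) (rows cols : Int)
    (dist : PySem.Dict (Int × Int) Int) : PySem.Dict (Int × Int) Int :=
  dist.items.foldl (fun new p => pvDirs.foldl (pvRelax board rows cols p.1 p.2) new) dist

-- B's `while True:` loop; fuel rows*cols+2 bounds the rounds (each non-final round adds at least
-- one key and there are at most rows*cols keys).  `new.get(goal, -1)` with goal possibly None:
-- None is never a key, so the `none` arm returns -1 exactly as Python does.
def pvLoopBF (board : List String) (rows cols : Int) (goal : Option (Int × Int)) :
    Nat → PySem.Dict (Int × Int) Int → Int
  | 0, _ => -1
  | f + 1, dist =>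
    let new := pvRound board rows cols dist
    if new.size = dist.size then
      match goal with
      | none => -1
      | some g => new.getD g (-1)
    else pvLoopBF board rows cols goal f new

def solution_alt (board : List String) : Int :=
  let rows : Int := (board.length : Int)
  match PySem.List.pyGet? board 0 with
  | none => -1  -- Python raises IndexError at board[0]; outside Pre_solution
  | some row0 =>
    let cols : Int := (PySem.Str.len row0 : Int)
    let sg := pvScan board rows cols
    match sg.1 with
    | none => -1  -- Python raises TypeError unpacking None in the items loop; outside Pre_solution
    | some s =>
      pvLoopBF board rows cols sg.2 (rows.toNat * cols.toNat + 2)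
        (PySem.Dict.ofList [((s.1, s.2), 0)])

-- ===== PRECONDITION & SPEC =====
-- Pre_ excludes exactly the inputs where the Python raises: an empty board (IndexError at board[0]),
-- a row shorter than row 0 (IndexError in the scan), and a board with no 'R' in the scanned columns
-- (start stays None; A raises TypeError at start[0], B when unpacking the None key).
def Pre_solution (board : List String) : Prop :=
  board ≠ [] ∧
  (∀ s ∈ board, (board.headI).toList.length ≤ s.toList.length) ∧
  ∃ s ∈ board, 'R' ∈ s.toList.take (board.headI).toList.length
instance (board : List String) : Decidable (Pre_solution board) := by
  unfold Pre_solution; infer_instance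

def pvWitness_solution : List String := ["RG"]

def Spec_solution (board : List String) (out : Int) : Prop := out = solution_alt board
instance (board : List String) (out : Int) : Decidable (Spec_solution board out) := by
  unfold Spec_solution; infer_instance

-- ===== CLAIM (what is proved, stated in full; the proofs are below) =====
def Claim_equal_solution : Prop :=
  ∀ (board : List String), Dom_solution board → Pre_solution board →
    Spec_solution board (solution board)

-- ===== LEMMAS AND PROOFS =====

-- proof-side reference level-synchronised BFS, used as the bridge between the two ports
def pvInGrid (rows cols : Int) (c : Int × Int) : Prop :=
  0 ≤ c.1 ∧ c.1 < rows ∧ 0 ≤ c.2 ∧ c.2 < cols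

def pvTri (m : Int) (c : Int × Int) : Int × Int × Int := (c.1, c.2, m)

def pvStepB (board : List String) (rows cols : Int) (c : Int × Int)
    (nv : List (Int × Int) × PySem.Set (Int × Int)) (d : Int × Int) :
    List (Int × Int) × PySem.Set (Int × Int) :=
  let p := pvSlide board rows cols d.1 d.2 ((rows + cols).toNat) c
  if p ∈ nv.2 then nv else (nv.1 ++ [p], PySem.Set.add nv.2 p)

def pvExpand (board : List String) (rows cols : Int) (F : List (Int × Int))
    (acc : List (Int × Int) × PySem.Set (Int × Int)) :
    List (Int × Int) × PySem.Set (Int × Int) :=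
  F.foldl (fun nv c => pvDirs.foldl (pvStepB board rows cols c) nv) acc

def pvLoopB (board : List String) (rows cols : Int) (goal : Option (Int × Int))
    (fuel : Nat) (F : List (Int × Int)) (vis : PySem.Set (Int × Int)) (m : Int) : Int :=
  match F with
  | [] => -1
  | c :: F' =>
    if (c :: F').any (fun c => some c == goal) then m
    else
      match fuel with
      | 0 => -1
      | f + 1 =>
        let nv := pvExpand board rows cols (c :: F') ([], vis)
        pvLoopB board rows cols goal f nv.1 nv.2 (m + 1)

-- the slide-neighbourhood of a cell and the sets reachable in ≤ k moves
def pvNbr (board : List String) (rows cols : Int) (c : Int × Int) : List (Int × Int) :=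
  pvDirs.map (fun d => pvSlide board rows cols d.1 d.2 ((rows + cols).toNat) c)

def pvR (board : List String) (rows cols : Int) (s : Int × Int) : Nat → Finset (Int × Int)
  | 0 => {s}
  | k + 1 => pvR board rows cols s k ∪
      (pvR board rows cols s k).biUnion (fun c => (pvNbr board rows cols c).toFinset)

def pvPrevR (board : List String) (rows cols : Int) (s : Int × Int) : Nat → Finset (Int × Int)
  | 0 => ∅
  | k + 1 => pvR board rows cols s k

-- first level at which a cell becomes reachable
def pvMin (board : List String) (rows cols : Int) (s : Int × Int) (v : Int × Int) (j : Nat) : Prop :=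
  v ∈ pvR board rows cols s j ∧ ∀ i < j, v ∉ pvR board rows cols s i

-- the common answer both loops compute: the least level containing the goal, else -1
def pvAns (board : List String) (rows cols : Int) (s : Int × Int)
    (goal : Option (Int × Int)) : Int :=
  match goal with
  | none => -1
  | some g =>
    match (List.range (rows.toNat * cols.toNat + 2)).find?
        (fun k => decide (g ∈ pvR board rows cols s k)) with
    | some k => (k : Int)
    | none => -1


lemma pv_slide_inGrid (board : List String) (rows cols dx dy : Int) :
    ∀ (f : Nat) (p : Int × Int), pvInGrid rows cols p →
      pvInGrid rows cols (pvSlide board rows cols dx dy f p) := by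
  intro f
  induction f with
  | zero => intro p hp; exact hp
  | succ f ih =>
    rintro ⟨nx, ny⟩ hp
    rw [pvSlide]
    split
    · rename_i h
      exact ih (nx + dx, ny + dy) ⟨h.1, h.2.1, h.2.2.1, h.2.2.2.1⟩
    · exact hp

lemma pv_scan_inGrid (board : List String) (rows cols : Int) (c : Int × Int)
    (h : (pvScan board rows cols).1 = some c) : pvInGrid rows cols c := by
  have key : (fun sg : Option (Int × Int) × Option (Int × Int) =>
      ∀ c', sg.1 = some c' → pvInGrid rows cols c') (pvScan board rows cols) := by
    unfold pvScan
    refine List.foldlRecOn (motive := fun (sg : Option (Int × Int) × Option (Int × Int)) =>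
      ∀ c', sg.1 = some c' → pvInGrid rows cols c') _ _ (by simp) ?_
    intro sg hsg i hi
    unfold pvScanRow
    refine List.foldlRecOn (motive := fun (sg : Option (Int × Int) × Option (Int × Int)) =>
      ∀ c', sg.1 = some c' → pvInGrid rows cols c') _ _ hsg ?_
    intro sg' hsg' j hj
    rw [PySem.List.mem_pyRange_one] at hi hj
    intro c'
    unfold pvScanCell
    split
    · rintro h'; cases h'; exact ⟨hi.1, hi.2, hj.1, hj.2⟩
    · split
      · intro h'; exact hsg' c' (by simpa using h')
      · exact hsg' c'
  exact key c h

lemma pvLoopA_nil (board : List String) (rows cols : Int) (goal : Option (Int × Int))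
    (fuel : Nat) (vis : PySem.Set (Int × Int)) :
    pvLoopA board rows cols goal fuel [] vis = -1 := by rw [pvLoopA.eq_def]

lemma pvLoopA_cons (board : List String) (rows cols : Int) (goal : Option (Int × Int))
    (fuel : Nat) (x y m : Int) (rest : List (Int × Int × Int)) (vis : PySem.Set (Int × Int)) :
    pvLoopA board rows cols goal fuel ((x, y, m) :: rest) vis =
      if some (x, y) = goal then m
      else
        match fuel with
        | 0 => -1
        | f + 1 =>
          let qv := pvDirs.foldl (pvStepA board rows cols x y m) (rest, vis)
          pvLoopA board rows cols goal f qv.1 qv.2 := by rw [pvLoopA.eq_def]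

lemma pv_dirfold (board : List String) (rows cols : Int) :
    ∀ (ds : List (Int × Int)) (c : Int × Int) (m : Int) (q : List (Int × Int × Int))
      (N : List (Int × Int)) (V : PySem.Set (Int × Int)),
      ds.foldl (pvStepA board rows cols c.1 c.2 m) (q ++ N.map (pvTri (m + 1)), V) =
        (q ++ (ds.foldl (pvStepB board rows cols c) (N, V)).1.map (pvTri (m + 1)),
         (ds.foldl (pvStepB board rows cols c) (N, V)).2) := by
  intro ds
  induction ds with
  | nil => intro c m q N V; simp
  | cons d ds ih =>
    intro c m q N V
    simp only [List.foldl_cons]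
    rw [show pvStepA board rows cols c.1 c.2 m (q ++ N.map (pvTri (m + 1)), V) d =
        (q ++ (pvStepB board rows cols c (N, V) d).1.map (pvTri (m + 1)),
         (pvStepB board rows cols c (N, V) d).2) from ?_]
    · exact ih c m q (pvStepB board rows cols c (N, V) d).1 (pvStepB board rows cols c (N, V) d).2
    · unfold pvStepA pvStepB
      simp only [Prod.mk.eta]
      split
      · rfl
      · simp [pvTri]

lemma pv_level (board : List String) (rows cols : Int) (goal : Option (Int × Int)) :
    ∀ (F : List (Int × Int)) (fa : Nat) (N : List (Int × Int)) (V : PySem.Set (Int × Int)) (m : Int),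
      (∀ c ∈ F, some c ≠ goal) →
      pvLoopA board rows cols goal (F.length + fa) (F.map (pvTri m) ++ N.map (pvTri (m + 1))) V =
        pvLoopA board rows cols goal fa
          ((pvExpand board rows cols F (N, V)).1.map (pvTri (m + 1)))
          (pvExpand board rows cols F (N, V)).2 := by
  intro F
  induction F with
  | nil => intro fa N V m h; simp [pvExpand]
  | cons c F ih =>
    intro fa N V m h
    have hc : ¬ some (c.1, c.2) = goal := by simpa using h c (by simp)
    have hq : (c :: F).map (pvTri m) ++ N.map (pvTri (m + 1)) =
        (c.1, c.2, m) :: (F.map (pvTri m) ++ N.map (pvTri (m + 1))) := by simp [pvTri]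
    rw [hq, pvLoopA_cons]
    simp only [hc, if_false]
    have hfl : (c :: F).length + fa = (F.length + fa) + 1 := by simp; omega
    rw [hfl]
    have hd := pv_dirfold board rows cols pvDirs c m (F.map (pvTri m)) N V
    simp only [hd]
    have he : pvExpand board rows cols (c :: F) (N, V) =
        pvExpand board rows cols F (pvDirs.foldl (pvStepB board rows cols c) (N, V)) := by
      simp [pvExpand]
    rw [he]
    exact ih fa _ _ m (fun c' hc' => h c' (by simp [hc']))

lemma pv_found (board : List String) (rows cols : Int) (goal : Option (Int × Int)) :
    ∀ (F : List (Int × Int)) (fa : Nat) (N : List (Int × Int)) (V : PySem.Set (Int × Int)) (m : Int),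
      (∃ c ∈ F, some c = goal) →
      pvLoopA board rows cols goal (F.length + fa) (F.map (pvTri m) ++ N.map (pvTri (m + 1))) V = m := by
  intro F
  induction F with
  | nil => intro fa N V m h; simp at h
  | cons c F ih =>
    intro fa N V m h
    have hq : (c :: F).map (pvTri m) ++ N.map (pvTri (m + 1)) =
        (c.1, c.2, m) :: (F.map (pvTri m) ++ N.map (pvTri (m + 1))) := by simp [pvTri]
    rw [hq, pvLoopA_cons]
    by_cases hc : some (c.1, c.2) = goal
    · simp [hc]
    · simp only [hc, if_false]
      have hgoal : ∃ c' ∈ F, some c' = goal := by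
        rcases h with ⟨c', hc', hg⟩
        rcases List.mem_cons.mp hc' with rfl | hmem
        · exact absurd (by simpa using hg) hc
        · exact ⟨c', hmem, hg⟩
      have hfl : (c :: F).length + fa = (F.length + fa) + 1 := by simp; omega
      rw [hfl]
      have hd := pv_dirfold board rows cols pvDirs c m (F.map (pvTri m)) N V
      simp only [hd]
      exact ih fa _ _ m hgoal

lemma pv_cell_isSome (board : List String) (i j : Int)
    (sg : Option (Int × Int) × Option (Int × Int)) (h : sg.1.isSome) :
    (pvScanCell board i sg j).1.isSome := by
  unfold pvScanCell
  split
  · simp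
  · split
    · exact h
    · exact h

lemma pv_rowfold_isSome (board : List String) (i : Int) (l : List Int)
    (sg : Option (Int × Int) × Option (Int × Int)) (h : sg.1.isSome) :
    (l.foldl (pvScanCell board i) sg).1.isSome := by
  refine List.foldlRecOn (motive := fun (sg : Option (Int × Int) × Option (Int × Int)) =>
    sg.1.isSome = true) _ _ h ?_
  intro sg' h' j _
  exact pv_cell_isSome board i j sg' h'

lemma pv_scanfold_isSome (board : List String) (cols : Int) (l : List Int)
    (sg : Option (Int × Int) × Option (Int × Int)) (h : sg.1.isSome) :
    (l.foldl (pvScanRow board cols) sg).1.isSome := by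
  refine List.foldlRecOn (motive := fun (sg : Option (Int × Int) × Option (Int × Int)) =>
    sg.1.isSome = true) _ _ h ?_
  intro sg' h' i _
  exact pv_rowfold_isSome board i _ sg' h'

lemma pv_row_hit (board : List String) (cols i j : Int)
    (sg : Option (Int × Int) × Option (Int × Int))
    (hj0 : 0 ≤ j) (hj1 : j < cols) (hR : pvCharAt board i j = some 'R') :
    (pvScanRow board cols sg i).1.isSome := by
  unfold pvScanRow
  rw [PySem.List.pyRange_one_append 0 j cols hj0 (le_of_lt hj1), List.foldl_append,
      PySem.List.pyRange_one_cons hj1, List.foldl_cons]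
  apply pv_rowfold_isSome
  unfold pvScanCell
  rw [if_pos hR]
  simp

lemma pv_scan_hit (board : List String) (rows cols i j : Int)
    (hi0 : 0 ≤ i) (hi1 : i < rows) (hj0 : 0 ≤ j) (hj1 : j < cols)
    (hR : pvCharAt board i j = some 'R') :
    (pvScan board rows cols).1.isSome := by
  unfold pvScan
  rw [PySem.List.pyRange_one_append 0 i rows hi0 (le_of_lt hi1), List.foldl_append,
      PySem.List.pyRange_one_cons hi1, List.foldl_cons]
  exact pv_scanfold_isSome board cols _ _ (pv_row_hit board cols i j _ hj0 hj1 hR)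

lemma pvLoopB_nil (board : List String) (rows cols : Int) (goal : Option (Int × Int))
    (fuel : Nat) (vis : PySem.Set (Int × Int)) (m : Int) :
    pvLoopB board rows cols goal fuel [] vis m = -1 := by rw [pvLoopB.eq_def]

lemma pvLoopB_cons_succ (board : List String) (rows cols : Int) (goal : Option (Int × Int))
    (f : Nat) (c : Int × Int) (F' : List (Int × Int)) (vis : PySem.Set (Int × Int)) (m : Int) :
    pvLoopB board rows cols goal (f + 1) (c :: F') vis m =
      if (c :: F').any (fun c => some c == goal) then m
      else
        let nv := pvExpand board rows cols (c :: F') ([], vis)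
        pvLoopB board rows cols goal f nv.1 nv.2 (m + 1) := by rw [pvLoopB.eq_def]

lemma pv_stepB_props (board : List String) (rows cols : Int) :
    ∀ (ds : List (Int × Int)) (c : Int × Int) (N : List (Int × Int)) (V : PySem.Set (Int × Int)),
      pvInGrid rows cols c →
      (∀ p ∈ N, pvInGrid rows cols p) → (∀ p ∈ V, pvInGrid rows cols p) → V.Nodup →
      (∀ p ∈ (ds.foldl (pvStepB board rows cols c) (N, V)).1, pvInGrid rows cols p) ∧
      (∀ p ∈ (ds.foldl (pvStepB board rows cols c) (N, V)).2, pvInGrid rows cols p) ∧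
      (ds.foldl (pvStepB board rows cols c) (N, V)).2.Nodup ∧
      (ds.foldl (pvStepB board rows cols c) (N, V)).2.length + N.length =
        V.length + (ds.foldl (pvStepB board rows cols c) (N, V)).1.length := by
  intro ds
  induction ds with
  | nil =>
    intro c N V hc hN hV hnd
    simp only [List.foldl_nil]
    exact ⟨hN, hV, hnd, by simp⟩
  | cons d ds ih =>
    intro c N V hc hN hV hnd
    simp only [List.foldl_cons]
    have hp := pv_slide_inGrid board rows cols d.1 d.2 ((rows + cols).toNat) c hc
    by_cases hmem : pvSlide board rows cols d.1 d.2 ((rows + cols).toNat) c ∈ V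
    · rw [show pvStepB board rows cols c (N, V) d = (N, V) from by
        simp only [pvStepB]; rw [if_pos hmem]]
      exact ih c N V hc hN hV hnd
    · rw [show pvStepB board rows cols c (N, V) d =
          (N ++ [pvSlide board rows cols d.1 d.2 ((rows + cols).toNat) c],
           V ++ [pvSlide board rows cols d.1 d.2 ((rows + cols).toNat) c]) from by
        simp only [pvStepB]; rw [if_neg hmem, PySem.Set.add_of_not_mem hmem]]
      set p := pvSlide board rows cols d.1 d.2 ((rows + cols).toNat) c with hpdef
      have h1 : ∀ q ∈ N ++ [p], pvInGrid rows cols q := by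
        intro q hq; rcases List.mem_append.mp hq with h | h
        · exact hN q h
        · simp at h; subst h; exact hp
      have h2 : ∀ q ∈ V ++ [p], pvInGrid rows cols q := by
        intro q hq; rcases List.mem_append.mp hq with h | h
        · exact hV q h
        · simp at h; subst h; exact hp
      have h3 : (V ++ [p]).Nodup := by
        rw [List.nodup_append]
        refine ⟨hnd, List.nodup_singleton p, ?_⟩
        intro a ha b hb
        rw [List.mem_singleton] at hb
        subst hb
        exact fun h => hmem (h ▸ ha)
      have hres := ih c (N ++ [p]) (V ++ [p]) hc h1 h2 h3
      refine ⟨hres.1, hres.2.1, hres.2.2.1, ?_⟩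
      have h4 := hres.2.2.2
      simp only [List.length_append, List.length_cons, List.length_nil] at h4 ⊢
      omega

lemma pv_expand_props (board : List String) (rows cols : Int) :
    ∀ (F : List (Int × Int)) (N : List (Int × Int)) (V : PySem.Set (Int × Int)),
      (∀ p ∈ F, pvInGrid rows cols p) →
      (∀ p ∈ N, pvInGrid rows cols p) → (∀ p ∈ V, pvInGrid rows cols p) → V.Nodup →
      (∀ p ∈ (pvExpand board rows cols F (N, V)).1, pvInGrid rows cols p) ∧
      (∀ p ∈ (pvExpand board rows cols F (N, V)).2, pvInGrid rows cols p) ∧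
      (pvExpand board rows cols F (N, V)).2.Nodup ∧
      (pvExpand board rows cols F (N, V)).2.length + N.length =
        V.length + (pvExpand board rows cols F (N, V)).1.length := by
  intro F
  induction F with
  | nil =>
    intro N V hF hN hV hnd
    simp only [pvExpand, List.foldl_nil]
    exact ⟨hN, hV, hnd, by simp⟩
  | cons c F ih =>
    intro N V hF hN hV hnd
    obtain ⟨s1, s2, s3, s4⟩ :=
      pv_stepB_props board rows cols pvDirs c N V (hF c (by simp)) hN hV hnd
    have he : pvExpand board rows cols (c :: F) (N, V) =
        pvExpand board rows cols F ((pvDirs.foldl (pvStepB board rows cols c) (N, V)).1,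
          (pvDirs.foldl (pvStepB board rows cols c) (N, V)).2) := by
      simp [pvExpand]
    have hres := ih (pvDirs.foldl (pvStepB board rows cols c) (N, V)).1
      (pvDirs.foldl (pvStepB board rows cols c) (N, V)).2
      (fun c' hc' => hF c' (by simp [hc'])) s1 s2 s3
    rw [he]
    refine ⟨hres.1, hres.2.1, hres.2.2.1, ?_⟩
    have h4 := hres.2.2.2
    omega

lemma pv_card (rows cols : Int) (V : List (Int × Int)) (hnd : V.Nodup)
    (hg : ∀ c ∈ V, pvInGrid rows cols c) : V.length ≤ rows.toNat * cols.toNat := by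
  have hsub : V.toFinset ⊆ Finset.Ico (0 : Int) rows ×ˢ Finset.Ico (0 : Int) cols := by
    intro c hc
    have := hg c (List.mem_toFinset.mp hc)
    simp only [Finset.mem_product, Finset.mem_Ico]
    exact ⟨⟨this.1, this.2.1⟩, ⟨this.2.2.1, this.2.2.2⟩⟩
  have hcard := Finset.card_le_card hsub
  rw [List.toFinset_card_of_nodup hnd] at hcard
  simpa [Finset.card_product, Int.card_Ico] using hcard

lemma pv_main (board : List String) (rows cols : Int) (goal : Option (Int × Int)) :
    ∀ (fb : Nat) (F : List (Int × Int)) (V : PySem.Set (Int × Int)) (m : Int) (fa : Nat),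
      V.Nodup → (∀ c ∈ V, pvInGrid rows cols c) → (∀ c ∈ F, pvInGrid rows cols c) →
      2 * (rows.toNat * cols.toNat - V.length) + F.length ≤ fa →
      rows.toNat * cols.toNat - V.length + 2 ≤ fb →
      pvLoopA board rows cols goal fa (F.map (pvTri m)) V =
        pvLoopB board rows cols goal fb F V m := by
  intro fb
  induction fb with
  | zero => intro F V m fa hnd hV hF hfa hfb; omega
  | succ g ih =>
    intro F V m fa hnd hV hF hfa hfb
    obtain ⟨G, hGdef⟩ : ∃ G, G = rows.toNat * cols.toNat := ⟨_, rfl⟩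
    rw [← hGdef] at hfa hfb
    cases F with
    | nil => simp only [List.map_nil, pvLoopA_nil, pvLoopB_nil]
    | cons c F' =>
      have hlen1 : 1 ≤ (c :: F').length := by simp
      rw [pvLoopB_cons_succ]
      by_cases hg : (c :: F').any (fun c => some c == goal)
      · rw [if_pos hg]
        rw [List.any_eq_true] at hg
        obtain ⟨x, hx, hbeq⟩ := hg
        have hex : ∃ c' ∈ c :: F', some c' = goal := ⟨x, hx, by simpa using hbeq⟩
        have h0 : (c :: F').map (pvTri m) =
            (c :: F').map (pvTri m) ++ ([] : List (Int × Int)).map (pvTri (m + 1)) := by simp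
        rw [h0, show fa = (c :: F').length + (fa - (c :: F').length) from by omega]
        exact pv_found board rows cols goal (c :: F') (fa - (c :: F').length) [] V m hex
      · rw [if_neg hg]
        have hng : ∀ c' ∈ c :: F', some c' ≠ goal := by
          intro c' hc' heq
          exact hg (List.any_eq_true.mpr ⟨c', hc', by simp [heq]⟩)
        have h0 : (c :: F').map (pvTri m) =
            (c :: F').map (pvTri m) ++ ([] : List (Int × Int)).map (pvTri (m + 1)) := by simp
        rw [h0, show fa = (c :: F').length + (fa - (c :: F').length) from by omega]
        rw [pv_level board rows cols goal (c :: F') (fa - (c :: F').length) [] V m hng]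
        show pvLoopA board rows cols goal (fa - (c :: F').length)
            (List.map (pvTri (m + 1)) (pvExpand board rows cols (c :: F') ([], V)).1)
            (pvExpand board rows cols (c :: F') ([], V)).2 =
          pvLoopB board rows cols goal g (pvExpand board rows cols (c :: F') ([], V)).1
            (pvExpand board rows cols (c :: F') ([], V)).2 (m + 1)
        obtain ⟨e1, e2, e3, e4⟩ :=
          pv_expand_props board rows cols (c :: F') [] V hF (by simp) hV hnd
        have hVG := pv_card rows cols V hnd hV
        have hEG := pv_card rows cols (pvExpand board rows cols (c :: F') ([], V)).2 e3 e2
        rw [← hGdef] at hVG hEG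
        cases hE1 : (pvExpand board rows cols (c :: F') ([], V)).1 with
        | nil =>
          simp only [List.map_nil, pvLoopA_nil, pvLoopB_nil]
        | cons c2 F2 =>
          rw [hE1] at e1 e4
          rw [ih (c2 :: F2) (pvExpand board rows cols (c :: F') ([], V)).2 (m + 1)
            (fa - (c :: F').length) e3 e2 e1 ?_ ?_]
          · rw [← hGdef]
            simp only [List.length_cons, List.length_nil] at e4 hfa ⊢
            omega
          · rw [← hGdef]
            simp only [List.length_cons, List.length_nil] at e4 hfa hfb ⊢
            omega


lemma pvR_mono_succ (board : List String) (rows cols : Int) (s : Int × Int) (k : Nat) :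
    pvR board rows cols s k ⊆ pvR board rows cols s (k + 1) := by
  rw [pvR]; exact Finset.subset_union_left

lemma pvR_mono (board : List String) (rows cols : Int) (s : Int × Int) {j k : Nat}
    (h : j ≤ k) : pvR board rows cols s j ⊆ pvR board rows cols s k := by
  induction h with
  | refl => exact subset_rfl
  | step h ih => exact ih.trans (pvR_mono_succ board rows cols s _)


lemma pvNbr_subset (board : List String) (rows cols : Int) (s : Int × Int) {u : Int × Int}
    {j : Nat} (hu : u ∈ pvR board rows cols s j) :
    ∀ p ∈ pvNbr board rows cols u, p ∈ pvR board rows cols s (j + 1) := by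
  intro p hp
  rw [pvR]
  exact Finset.mem_union.mpr (Or.inr (Finset.mem_biUnion.mpr ⟨u, hu, List.mem_toFinset.mpr hp⟩))

lemma pvR_stable (board : List String) (rows cols : Int) (s : Int × Int) {k : Nat}
    (h : pvR board rows cols s (k + 1) = pvR board rows cols s k) :
    ∀ l, pvR board rows cols s l ⊆ pvR board rows cols s k := by
  intro l
  induction l with
  | zero => exact pvR_mono board rows cols s (Nat.zero_le k)
  | succ l ih =>
    rw [pvR]
    refine Finset.union_subset ih (Finset.biUnion_subset.mpr ?_)
    intro u hu p hp
    rw [← h]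
    exact pvNbr_subset board rows cols s (ih hu) p (List.mem_toFinset.mp hp)

lemma pvR_grid (board : List String) (rows cols : Int) (s : Int × Int)
    (hs : pvInGrid rows cols s) :
    ∀ k, ∀ p ∈ pvR board rows cols s k, pvInGrid rows cols p := by
  intro k
  induction k with
  | zero => intro p hp; rw [pvR, Finset.mem_singleton] at hp; subst hp; exact hs
  | succ k ih =>
    intro p hp
    rw [pvR] at hp
    rcases Finset.mem_union.mp hp with h | h
    · exact ih p h
    · obtain ⟨u, hu, hpn⟩ := Finset.mem_biUnion.mp h
      obtain ⟨d, _, hd⟩ := List.mem_map.mp (List.mem_toFinset.mp hpn)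
      subst hd
      exact pv_slide_inGrid board rows cols d.1 d.2 ((rows + cols).toNat) u (ih u hu)

lemma pvR_card_le (board : List String) (rows cols : Int) (s : Int × Int)
    (hs : pvInGrid rows cols s) (k : Nat) :
    (pvR board rows cols s k).card ≤ rows.toNat * cols.toNat := by
  have hsub : pvR board rows cols s k ⊆
      Finset.Ico (0 : Int) rows ×ˢ Finset.Ico (0 : Int) cols := by
    intro c hc
    have := pvR_grid board rows cols s hs k c hc
    simp only [Finset.mem_product, Finset.mem_Ico]
    exact ⟨⟨this.1, this.2.1⟩, ⟨this.2.2.1, this.2.2.2⟩⟩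
  simpa [Finset.card_product, Int.card_Ico] using Finset.card_le_card hsub

lemma pvMin_unique (board : List String) (rows cols : Int) (s : Int × Int) {v : Int × Int}
    {j j' : Nat} (h1 : pvMin board rows cols s v j) (h2 : pvMin board rows cols s v j') :
    j = j' := by
  rcases lt_trichotomy j j' with h | h | h
  · exact absurd h1.1 (h2.2 j h)
  · exact h
  · exact absurd h2.1 (h1.2 j' h)

lemma pvMin_exists (board : List String) (rows cols : Int) (s : Int × Int) {v : Int × Int}
    {j : Nat} (h : v ∈ pvR board rows cols s j) :
    ∃ i ≤ j, pvMin board rows cols s v i := by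
  induction j with
  | zero => exact ⟨0, le_refl 0, h, fun i hi => absurd hi (Nat.not_lt_zero i)⟩
  | succ j ih =>
    by_cases hv : v ∈ pvR board rows cols s j
    · obtain ⟨i, hi, hm⟩ := ih hv
      exact ⟨i, hi.trans (Nat.le_succ j), hm⟩
    · refine ⟨j + 1, le_refl _, h, ?_⟩
      intro i hi
      exact fun hmem => hv (pvR_mono board rows cols s (Nat.lt_succ_iff.mp hi) hmem)

lemma pv_find?_range_some {p : Nat → Bool} {j : Nat} :
    ∀ N : Nat, j < N → p j = true → (∀ i < j, p i = false) →
      (List.range N).find? p = some j := by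
  intro N
  induction N with
  | zero => intro h _ _; omega
  | succ M ih =>
    intro hj hpj hmin
    rw [List.range_succ, List.find?_append]
    by_cases hjN : j < M
    · rw [ih hjN hpj hmin]; rfl
    · have hjeq : j = M := by omega
      subst hjeq
      have hnone : (List.range j).find? p = none :=
        List.find?_eq_none.mpr (fun i hi => by
          simp [hmin i (List.mem_range.mp hi)])
      rw [hnone]
      simp [List.find?, hpj]


lemma pv_step_mem (board : List String) (rows cols : Int) :
    ∀ (ds : List (Int × Int)) (c : Int × Int) (N : List (Int × Int))
      (V : PySem.Set (Int × Int)) (x : Int × Int),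
      (x ∈ (ds.foldl (pvStepB board rows cols c) (N, V)).1 ↔
        x ∈ N ∨ ∃ d ∈ ds, pvSlide board rows cols d.1 d.2 ((rows + cols).toNat) c = x ∧ x ∉ V) ∧
      (x ∈ (ds.foldl (pvStepB board rows cols c) (N, V)).2 ↔
        x ∈ V ∨ ∃ d ∈ ds, pvSlide board rows cols d.1 d.2 ((rows + cols).toNat) c = x) := by
  intro ds
  induction ds with
  | nil => intro c N V x; simp
  | cons d ds ih =>
    intro c N V x
    simp only [List.foldl_cons]
    by_cases hq : pvSlide board rows cols d.1 d.2 ((rows + cols).toNat) c ∈ V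
    · rw [show pvStepB board rows cols c (N, V) d = (N, V) from by
        simp only [pvStepB]; rw [if_pos hq]]
      obtain ⟨h1, h2⟩ := ih c N V x
      constructor
      · rw [h1]
        simp only [List.mem_cons]
        constructor
        · rintro (h | ⟨d', hd', hs', hv'⟩)
          · exact Or.inl h
          · exact Or.inr ⟨d', Or.inr hd', hs', hv'⟩
        · rintro (h | ⟨d', hd' | hd', hs', hv'⟩)
          · exact Or.inl h
          · subst hd'; subst hs'; exact absurd hq hv'
          · exact Or.inr ⟨d', hd', hs', hv'⟩
      · rw [h2]
        simp only [List.mem_cons]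
        constructor
        · rintro (h | ⟨d', hd', hs'⟩)
          · exact Or.inl h
          · exact Or.inr ⟨d', Or.inr hd', hs'⟩
        · rintro (h | ⟨d', hd' | hd', hs'⟩)
          · exact Or.inl h
          · subst hd'; subst hs'; exact Or.inl hq
          · exact Or.inr ⟨d', hd', hs'⟩
    · rw [show pvStepB board rows cols c (N, V) d =
          (N ++ [pvSlide board rows cols d.1 d.2 ((rows + cols).toNat) c],
           V ++ [pvSlide board rows cols d.1 d.2 ((rows + cols).toNat) c]) from by
        simp only [pvStepB]; rw [if_neg hq, PySem.Set.add_of_not_mem hq]]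
      set q := pvSlide board rows cols d.1 d.2 ((rows + cols).toNat) c with hqdef
      obtain ⟨h1, h2⟩ := ih c (N ++ [q]) (V ++ [q]) x
      constructor
      · rw [h1]
        simp only [List.mem_append, List.mem_cons, List.not_mem_nil, or_false]
        by_cases hxq : x = q
        · subst hxq
          constructor
          · intro _; exact Or.inr ⟨d, Or.inl rfl, hqdef.symm, hq⟩
          · intro _; exact Or.inl (Or.inr rfl)
        · constructor
          · rintro ((h | h) | ⟨d', hd', hs', hv'⟩)
            · exact Or.inl h
            · exact absurd h hxq
            · refine Or.inr ⟨d', Or.inr hd', hs', fun hx => hv' (Or.inl hx)⟩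
          · rintro (h | ⟨d', hd' | hd', hs', hv'⟩)
            · exact Or.inl (Or.inl h)
            · subst hd'; exact absurd hs'.symm hxq
            · exact Or.inr ⟨d', hd', hs', fun hx => hv' (by rcases hx with h | h; exact h; exact absurd h hxq)⟩
      · rw [h2]
        simp only [List.mem_append, List.mem_cons, List.not_mem_nil, or_false]
        by_cases hxq : x = q
        · subst hxq
          constructor
          · intro _; exact Or.inr ⟨d, Or.inl rfl, hqdef.symm⟩
          · intro _; exact Or.inl (Or.inr rfl)
        · constructor
          · rintro ((h | h) | ⟨d', hd', hs'⟩)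
            · exact Or.inl h
            · exact absurd h hxq
            · exact Or.inr ⟨d', Or.inr hd', hs'⟩
          · rintro (h | ⟨d', hd' | hd', hs'⟩)
            · exact Or.inl (Or.inl h)
            · subst hd'; exact absurd hs'.symm hxq
            · exact Or.inr ⟨d', hd', hs'⟩

lemma pv_expand_mem (board : List String) (rows cols : Int) :
    ∀ (F : List (Int × Int)) (N : List (Int × Int)) (V : PySem.Set (Int × Int)) (x : Int × Int),
      (x ∈ (pvExpand board rows cols F (N, V)).1 ↔
        x ∈ N ∨ ∃ c ∈ F, x ∈ pvNbr board rows cols c ∧ x ∉ V) ∧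
      (x ∈ (pvExpand board rows cols F (N, V)).2 ↔
        x ∈ V ∨ ∃ c ∈ F, x ∈ pvNbr board rows cols c) := by
  intro F
  induction F with
  | nil => intro N V x; simp [pvExpand]
  | cons c F ih =>
    intro N V x
    have he : pvExpand board rows cols (c :: F) (N, V) =
        pvExpand board rows cols F ((pvDirs.foldl (pvStepB board rows cols c) (N, V)).1,
          (pvDirs.foldl (pvStepB board rows cols c) (N, V)).2) := by
      simp [pvExpand]
    rw [he]
    obtain ⟨s1, s2⟩ := pv_step_mem board rows cols pvDirs c N V x
    obtain ⟨h1, h2⟩ := ih (pvDirs.foldl (pvStepB board rows cols c) (N, V)).1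
      (pvDirs.foldl (pvStepB board rows cols c) (N, V)).2 x
    have hnbr : ∀ y : Int × Int,
        (∃ d ∈ pvDirs, pvSlide board rows cols d.1 d.2 ((rows + cols).toNat) c = y) ↔
          y ∈ pvNbr board rows cols c := by
      intro y; unfold pvNbr; rw [List.mem_map]
    rw [hnbr x] at s2
    have s1' : x ∈ (pvDirs.foldl (pvStepB board rows cols c) (N, V)).1 ↔
        x ∈ N ∨ (x ∈ pvNbr board rows cols c ∧ x ∉ V) := by
      rw [s1]
      constructor
      · rintro (h | ⟨d, hd, hs, hv⟩)
        · exact Or.inl h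
        · exact Or.inr ⟨(hnbr x).mp ⟨d, hd, hs⟩, hv⟩
      · rintro (h | ⟨hn, hv⟩)
        · exact Or.inl h
        · obtain ⟨d, hd, hs⟩ := (hnbr x).mpr hn
          exact Or.inr ⟨d, hd, hs, hv⟩
    constructor
    · rw [h1, s1', s2]
      simp only [List.mem_cons]
      constructor
      · rintro ((h | ⟨hn, hv⟩) | ⟨c', hc', hn', hv'⟩)
        · exact Or.inl h
        · exact Or.inr ⟨c, Or.inl rfl, hn, hv⟩
        · have hxv : x ∉ V := fun hx => hv' (Or.inl hx)
          exact Or.inr ⟨c', Or.inr hc', hn', hxv⟩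
      · rintro (h | ⟨c', hc' | hc', hn', hv'⟩)
        · exact Or.inl (Or.inl h)
        · subst hc'; exact Or.inl (Or.inr ⟨hn', hv'⟩)
        · by_cases hnc : x ∈ pvNbr board rows cols c
          · exact Or.inl (Or.inr ⟨hnc, hv'⟩)
          · exact Or.inr ⟨c', hc', hn', fun hx => by
              rcases hx with h | h; exact hv' h; exact hnc h⟩
    · rw [h2, s2]
      simp only [List.mem_cons]
      constructor
      · rintro ((h | h) | ⟨c', hc', hn'⟩)
        · exact Or.inl h
        · exact Or.inr ⟨c, Or.inl rfl, h⟩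
        · exact Or.inr ⟨c', Or.inr hc', hn'⟩
      · rintro (h | ⟨c', hc' | hc', hn'⟩)
        · exact Or.inl (Or.inl h)
        · subst hc'; exact Or.inl (Or.inr hn')
        · exact Or.inr ⟨c', hc', hn'⟩

lemma pv_step_acc (board : List String) (rows cols : Int) :
    ∀ (ds : List (Int × Int)) (c : Int × Int) (N V0 : List (Int × Int)),
      (ds.foldl (pvStepB board rows cols c) (N, V0 ++ N)).2 =
        V0 ++ (ds.foldl (pvStepB board rows cols c) (N, V0 ++ N)).1 := by
  intro ds
  induction ds with
  | nil => intro c N V0; simp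
  | cons d ds ih =>
    intro c N V0
    simp only [List.foldl_cons]
    by_cases hq : pvSlide board rows cols d.1 d.2 ((rows + cols).toNat) c ∈ (V0 ++ N : List (Int × Int))
    · rw [show pvStepB board rows cols c (N, V0 ++ N) d = (N, V0 ++ N) from by
        simp only [pvStepB]; rw [if_pos hq]]
      exact ih c N V0
    · rw [show pvStepB board rows cols c (N, V0 ++ N) d =
          (N ++ [pvSlide board rows cols d.1 d.2 ((rows + cols).toNat) c],
           V0 ++ (N ++ [pvSlide board rows cols d.1 d.2 ((rows + cols).toNat) c])) from by
        simp only [pvStepB]; rw [if_neg hq, PySem.Set.add_of_not_mem hq, List.append_assoc]]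
      exact ih c (N ++ [pvSlide board rows cols d.1 d.2 ((rows + cols).toNat) c]) V0

lemma pv_expand_acc (board : List String) (rows cols : Int) :
    ∀ (F : List (Int × Int)) (N V0 : List (Int × Int)),
      (pvExpand board rows cols F (N, V0 ++ N)).2 =
        V0 ++ (pvExpand board rows cols F (N, V0 ++ N)).1 := by
  intro F
  induction F with
  | nil => intro N V0; simp [pvExpand]
  | cons c F ih =>
    intro N V0
    have he : pvExpand board rows cols (c :: F) (N, V0 ++ N) =
        pvExpand board rows cols F ((pvDirs.foldl (pvStepB board rows cols c) (N, V0 ++ N)).1,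
          (pvDirs.foldl (pvStepB board rows cols c) (N, V0 ++ N)).2) := by
      simp [pvExpand]
    rw [he, pv_step_acc board rows cols pvDirs c N V0]
    exact ih (pvDirs.foldl (pvStepB board rows cols c) (N, V0 ++ N)).1 V0


lemma pv_ans_empty (board : List String) (rows cols : Int) (s : Int × Int)
    (goal : Option (Int × Int)) (k : Nat)
    (hempty : pvR board rows cols s k \ pvPrevR board rows cols s k = ∅)
    (hub : ∀ j < k, ∀ g, goal = some g → g ∉ pvR board rows cols s j) :
    pvAns board rows cols s goal = -1 := by
  cases k with
  | zero =>
    exfalso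
    have : s ∈ pvR board rows cols s 0 \ pvPrevR board rows cols s 0 := by
      rw [pvR, pvPrevR]
      simp
    rw [hempty] at this
    simp at this
  | succ k =>
    have hsub : pvR board rows cols s (k + 1) ⊆ pvR board rows cols s k := by
      intro x hx
      by_contra hxk
      have : x ∈ pvR board rows cols s (k + 1) \ pvPrevR board rows cols s (k + 1) := by
        rw [pvPrevR]; exact Finset.mem_sdiff.mpr ⟨hx, hxk⟩
      rw [hempty] at this
      simp at this
    have heq : pvR board rows cols s (k + 1) = pvR board rows cols s k :=
      le_antisymm hsub (pvR_mono_succ board rows cols s k)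
    have hstable := pvR_stable board rows cols s heq
    cases goal with
    | none => rfl
    | some g =>
      have hg : g ∉ pvR board rows cols s k := hub k (Nat.lt_succ_self k) g rfl
      have hnone : (List.range (rows.toNat * cols.toNat + 2)).find?
          (fun i => decide (g ∈ pvR board rows cols s i)) = none := by
        refine List.find?_eq_none.mpr (fun i _ => ?_)
        simp only [decide_eq_true_eq]
        exact fun hi => hg (hstable i hi)
      simp [pvAns, hnone]

lemma pv_ans_found (board : List String) (rows cols : Int) (s : Int × Int)
    (goal : Option (Int × Int)) (k : Nat) (g : Int × Int) (hgoal : goal = some g)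
    (hg : g ∈ pvR board rows cols s k)
    (hub : ∀ j < k, g ∉ pvR board rows cols s j)
    (hk : k < rows.toNat * cols.toNat + 2) :
    pvAns board rows cols s goal = (k : Int) := by
  subst hgoal
  have hfind := pv_find?_range_some (p := fun i => decide (g ∈ pvR board rows cols s i))
    (rows.toNat * cols.toNat + 2) hk (by simpa using hg)
    (fun i hi => by simpa using hub i hi)
  simp [pvAns, hfind]

lemma pv_levelBFS_ans (board : List String) (rows cols : Int) (goal : Option (Int × Int))
    (s : Int × Int) (hs : pvInGrid rows cols s) :
    ∀ (fb k : Nat) (F V : List (Int × Int)),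
      V.Nodup → (∀ c ∈ V, pvInGrid rows cols c) → (∀ c ∈ F, pvInGrid rows cols c) →
      F.toFinset = pvR board rows cols s k \ pvPrevR board rows cols s k →
      V.toFinset = pvR board rows cols s k →
      (∀ j < k, ∀ g, goal = some g → g ∉ pvR board rows cols s j) →
      (F ≠ [] → k + 1 ≤ V.length) →
      (F ≠ [] → rows.toNat * cols.toNat - V.length + 2 ≤ fb) →
      pvLoopB board rows cols goal fb F V (k : Int) = pvAns board rows cols s goal := by
  intro fb
  induction fb with
  | zero =>
    intro k F V hnd hV hF hFs hVs hub hlen hfb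
    cases F with
    | nil =>
      rw [pvLoopB_nil]
      exact (pv_ans_empty board rows cols s goal k (by rw [← hFs]; simp) hub).symm
    | cons c F' =>
      by_cases hany : (c :: F').any (fun c => some c == goal)
      · have hret : pvLoopB board rows cols goal 0 (c :: F') V (k : Int) = (k : Int) := by
          rw [pvLoopB.eq_def]; simp only [hany, if_true]
        rw [hret]
        rw [List.any_eq_true] at hany
        obtain ⟨x, hx, hbeq⟩ := hany
        have hgoal : goal = some x := by simpa using (beq_iff_eq.mp hbeq).symm
        have hxF : x ∈ pvR board rows cols s k \ pvPrevR board rows cols s k := by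
          rw [← hFs]; exact List.mem_toFinset.mpr hx
        have hkG : k < rows.toNat * cols.toNat + 2 := by
          have h1 : k + 1 ≤ V.length := hlen (by simp)
          have h2 : V.toFinset.card = V.length := List.toFinset_card_of_nodup hnd
          have h3 : (pvR board rows cols s k).card ≤ rows.toNat * cols.toNat :=
            pvR_card_le board rows cols s hs k
          rw [hVs] at h2
          omega
        exact (pv_ans_found board rows cols s goal k x hgoal
          (Finset.mem_sdiff.mp hxF).1
          (fun j hj => hub j hj x hgoal) hkG).symm
      · exfalso
        have h1 : k + 1 ≤ V.length := by
          have hc : c ∈ pvR board rows cols s k \ pvPrevR board rows cols s k := by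
            rw [← hFs]; simp
          exact hlen (by simp)
        have := hfb (by simp)
        omega
  | succ f ih =>
    intro k F V hnd hV hF hFs hVs hub hlen hfb
    cases F with
    | nil =>
      rw [pvLoopB_nil]
      exact (pv_ans_empty board rows cols s goal k (by rw [← hFs]; simp) hub).symm
    | cons c F' =>
      by_cases hany : (c :: F').any (fun c => some c == goal)
      · have hret : pvLoopB board rows cols goal (f + 1) (c :: F') V (k : Int) = (k : Int) := by
          rw [pvLoopB.eq_def]; simp only [hany, if_true]
        rw [hret]
        rw [List.any_eq_true] at hany
        obtain ⟨x, hx, hbeq⟩ := hany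
        have hgoal : goal = some x := by simpa using (beq_iff_eq.mp hbeq).symm
        have hxF : x ∈ pvR board rows cols s k \ pvPrevR board rows cols s k := by
          rw [← hFs]; exact List.mem_toFinset.mpr hx
        have hkG : k < rows.toNat * cols.toNat + 2 := by
          have h1 : k + 1 ≤ V.length := hlen (by simp)
          have h2 : V.toFinset.card = V.length := List.toFinset_card_of_nodup hnd
          have h3 : (pvR board rows cols s k).card ≤ rows.toNat * cols.toNat :=
            pvR_card_le board rows cols s hs k
          rw [hVs] at h2
          omega
        exact (pv_ans_found board rows cols s goal k x hgoal
          (Finset.mem_sdiff.mp hxF).1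
          (fun j hj => hub j hj x hgoal) hkG).symm
      · rw [pvLoopB_cons_succ, if_neg (by simpa using hany)]
        have hnx : ∀ x ∈ c :: F', some x ≠ goal := by
          intro x hx heq
          exact hany (List.any_eq_true.mpr ⟨x, hx, by simp [heq]⟩)
        obtain ⟨e1, e2, e3, e4⟩ :=
          pv_expand_props board rows cols (c :: F') [] V hF (by simp) hV hnd
        have hacc : (pvExpand board rows cols (c :: F') ([], V)).2 =
            V ++ (pvExpand board rows cols (c :: F') ([], V)).1 := by
          have h := pv_expand_acc board rows cols (c :: F') [] V
          rwa [List.append_nil] at h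
        have e3' := e3
        rw [hacc] at e3'
        have hnodup1 : (pvExpand board rows cols (c :: F') ([], V)).1.Nodup :=
          (List.nodup_append.mp e3').2.1
        -- frontier set equation
        have hF1 : (pvExpand board rows cols (c :: F') ([], V)).1.toFinset =
            pvR board rows cols s (k + 1) \ pvPrevR board rows cols s (k + 1) := by
          ext x
          rw [List.mem_toFinset, pvPrevR, Finset.mem_sdiff]
          rw [(pv_expand_mem board rows cols (c :: F') [] V x).1]
          simp only [List.not_mem_nil, false_or]
          constructor
          · rintro ⟨c', hc', hn', hv'⟩
            have hc'R : c' ∈ pvR board rows cols s k :=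
              (Finset.mem_sdiff.mp (by rw [← hFs]; exact List.mem_toFinset.mpr hc')).1
            refine ⟨pvNbr_subset board rows cols s hc'R x hn', ?_⟩
            intro hxk
            exact hv' (by rw [← List.mem_toFinset, hVs]; exact hxk)
          · rintro ⟨hx1, hxk⟩
            rw [pvR] at hx1
            rcases Finset.mem_union.mp hx1 with h | h
            · exact absurd h hxk
            · obtain ⟨u, hu, hxn⟩ := Finset.mem_biUnion.mp h
              have hxn' : x ∈ pvNbr board rows cols u := List.mem_toFinset.mp hxn
              have huprev : u ∉ pvPrevR board rows cols s k := by
                cases k with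
                | zero => rw [pvPrevR]; simp
                | succ j =>
                  rw [pvPrevR]
                  intro huj
                  exact hxk (pvNbr_subset board rows cols s huj x hxn')
              have huF : u ∈ c :: F' := by
                rw [← List.mem_toFinset, hFs]
                exact Finset.mem_sdiff.mpr ⟨hu, huprev⟩
              refine ⟨u, huF, hxn', ?_⟩
              intro hxV
              exact hxk (by rw [← hVs]; exact List.mem_toFinset.mpr hxV)
        have hV1 : (pvExpand board rows cols (c :: F') ([], V)).2.toFinset =
            pvR board rows cols s (k + 1) := by
          rw [hacc, List.toFinset_append, hVs, hF1, pvPrevR]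
          exact Finset.union_sdiff_of_subset (pvR_mono_succ board rows cols s k)
        have hub' : ∀ j < k + 1, ∀ g, goal = some g → g ∉ pvR board rows cols s j := by
          intro j hj g hgoal
          rcases Nat.lt_succ_iff_lt_or_eq.mp hj with h | h
          · exact hub j h g hgoal
          · subst h
            intro hgk
            have hgprev : g ∉ pvPrevR board rows cols s j := by
              cases j with
              | zero => rw [pvPrevR]; simp
              | succ i => rw [pvPrevR]; exact hub i (Nat.lt_succ_self i) g hgoal
            have : g ∈ c :: F' := by
              rw [← List.mem_toFinset, hFs]
              exact Finset.mem_sdiff.mpr ⟨hgk, hgprev⟩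
            exact hnx g this (by rw [hgoal])
        have hlenV : k + 1 ≤ V.length := hlen (by simp)
        have hlen2 : (pvExpand board rows cols (c :: F') ([], V)).2.length =
            V.length + (pvExpand board rows cols (c :: F') ([], V)).1.length := by
          simpa using e4
        have hcast : (k : Int) + 1 = ((k + 1 : Nat) : Int) := by push_cast; ring
        rw [hcast]
        refine ih (k + 1) _ _ e3 e2 e1 hF1 hV1 hub' ?_ ?_
        · intro hne
          have hpos : 1 ≤ (pvExpand board rows cols (c :: F') ([], V)).1.length :=
            List.length_pos_iff.mpr hne
          rw [hlen2]
          omega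
        · intro hne
          have hpos : 1 ≤ (pvExpand board rows cols (c :: F') ([], V)).1.length :=
            List.length_pos_iff.mpr hne
          have hfb' := hfb (by simp)
          have hEG := pv_card rows cols (pvExpand board rows cols (c :: F') ([], V)).2 e3 e2
          rw [hlen2] at hEG ⊢
          omega


-- Bellman-Ford table invariant: after k rounds the dict maps exactly the cells first reached
-- at some level j ≤ k to (j : Int)
def pvBase (board : List String) (rows cols : Int) (s : Int × Int) (k : Nat)
    (v : Int × Int) (dd : Int) : Prop :=
  ∃ j : Nat, j ≤ k ∧ pvMin board rows cols s v j ∧ dd = (j : Int)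

def pvTable (board : List String) (rows cols : Int) (s : Int × Int) (k : Nat)
    (dist : PySem.Dict (Int × Int) Int) : Prop :=
  ∀ v dd, dist.get? v = some dd ↔ pvBase board rows cols s k v dd

lemma pv_relax_inv (board : List String) (rows cols : Int) (s : Int × Int) (k : Nat) :
    ∀ (ds : List (Int × Int)) (u : Int × Int) (ju : Nat)
      (new : PySem.Dict (Int × Int) Int) (Q : (Int × Int) → Prop),
      (∀ d ∈ ds, d ∈ pvDirs) →
      pvMin board rows cols s u ju → ju ≤ k →
      (∀ v dd, new.get? v = some dd ↔
        pvBase board rows cols s k v dd ∨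
        (pvMin board rows cols s v (k + 1) ∧ dd = (k : Int) + 1 ∧ Q v)) →
      new.keys.Nodup →
      (∀ v dd, (ds.foldl (pvRelax board rows cols u (ju : Int)) new).get? v = some dd ↔
        pvBase board rows cols s k v dd ∨
        (pvMin board rows cols s v (k + 1) ∧ dd = (k : Int) + 1 ∧
          (Q v ∨ ∃ d ∈ ds, pvSlide board rows cols d.1 d.2 ((rows + cols).toNat) u = v))) ∧
      (ds.foldl (pvRelax board rows cols u (ju : Int)) new).keys.Nodup := by
  intro ds
  induction ds with
  | nil =>
    intro u ju new Q hds hmu hju hinv hnd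
    simp only [List.foldl_nil]
    refine ⟨fun v dd => (hinv v dd).trans (by simp), hnd⟩
  | cons d ds ih =>
    intro u ju new Q hds hmu hju hinv hnd
    simp only [List.foldl_cons]
    have htmem : pvSlide board rows cols d.1 d.2 ((rows + cols).toNat) u ∈
        pvNbr board rows cols u :=
      List.mem_map.mpr ⟨d, hds d (List.mem_cons_self), rfl⟩
    set t := pvSlide board rows cols d.1 d.2 ((rows + cols).toNat) u with htdef
    have htR : t ∈ pvR board rows cols s (ju + 1) :=
      pvNbr_subset board rows cols s hmu.1 t htmem
    obtain ⟨jt, hjt, hmt⟩ := pvMin_exists board rows cols s htR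
    have hjuk : (ju : Int) ≤ (k : Int) := by exact_mod_cast hju
    have hjtc : (jt : Int) ≤ (ju : Int) + 1 := by exact_mod_cast hjt
    cases hget : new.get? t with
    | some v0 =>
      have hstep : pvRelax board rows cols u (ju : Int) new d = new := by
        simp only [pvRelax, ← htdef, hget]
        rw [if_neg]
        rcases (hinv t v0).mp hget with ⟨j0, hj0, hm0, hv0⟩ | ⟨hm0, hv0, _⟩
        · have hj0t : j0 = jt := pvMin_unique board rows cols s hm0 hmt
          subst hv0; subst hj0t
          omega
        · have hjteq : jt = k + 1 := pvMin_unique board rows cols s hmt hm0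
          subst hv0
          have hc : ((k + 1 : Nat) : Int) ≤ (ju : Int) + 1 := by rw [← hjteq]; exact hjtc
          push_cast at hc
          omega
      rw [hstep]
      have hinv1 : ∀ v dd, new.get? v = some dd ↔
          pvBase board rows cols s k v dd ∨
          (pvMin board rows cols s v (k + 1) ∧ dd = (k : Int) + 1 ∧ (Q v ∨ t = v)) := by
        intro v dd
        rw [hinv v dd]
        constructor
        · rintro (h | ⟨h1, h2, h3⟩)
          · exact Or.inl h
          · exact Or.inr ⟨h1, h2, Or.inl h3⟩
        · rintro (h | ⟨h1, h2, hq | hteq⟩)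
          · exact Or.inl h
          · exact Or.inr ⟨h1, h2, hq⟩
          · have h1t : pvMin board rows cols s t (k + 1) := by rw [hteq]; exact h1
            rcases (hinv t v0).mp hget with ⟨j0, hj0, hm0, hv0⟩ | ⟨hm0, hv0, hQv⟩
            · have : j0 = k + 1 := pvMin_unique board rows cols s hm0 h1t
              omega
            · have hQv' : Q v := by rw [← hteq]; exact hQv
              exact Or.inr ⟨h1, h2, hQv'⟩
      obtain ⟨r1, r2⟩ := ih u ju new (fun v => Q v ∨ t = v)
        (fun d' hd' => hds d' (List.mem_cons_of_mem d hd')) hmu hju hinv1 hnd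
      refine ⟨fun v dd => (r1 v dd).trans ?_, r2⟩
      constructor
      · rintro (h | ⟨h1, h2, (hq | ht') | ⟨d', hd', hs'⟩⟩)
        · exact Or.inl h
        · exact Or.inr ⟨h1, h2, Or.inl hq⟩
        · refine Or.inr ⟨h1, h2, Or.inr ⟨d, List.mem_cons_self, ?_⟩⟩
          rw [← htdef]; exact ht'
        · exact Or.inr ⟨h1, h2, Or.inr ⟨d', List.mem_cons_of_mem d hd', hs'⟩⟩
      · rintro (h | ⟨h1, h2, hq | ⟨d', hd', hs'⟩⟩)
        · exact Or.inl h
        · exact Or.inr ⟨h1, h2, Or.inl (Or.inl hq)⟩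
        · rcases List.mem_cons.mp hd' with rfl | hd''
          · refine Or.inr ⟨h1, h2, Or.inl (Or.inr ?_)⟩
            rw [htdef]; exact hs'
          · exact Or.inr ⟨h1, h2, Or.inr ⟨d', hd'', hs'⟩⟩
    | none =>
      have hjtk : jt = k + 1 := by
        by_contra hne
        have hjtle : jt ≤ k := by omega
        have := (hinv t (jt : Int)).mpr (Or.inl ⟨jt, hjtle, hmt, rfl⟩)
        rw [hget] at this
        simp at this
      have hjuek : ju = k := by omega
      have hstep : pvRelax board rows cols u (ju : Int) new d =
          new.insert t ((ju : Int) + 1) := by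
        simp only [pvRelax, ← htdef, hget]
      rw [hstep]
      have hdu : (ju : Int) + 1 = (k : Int) + 1 := by rw [hjuek]
      have hinv1 : ∀ v dd, (new.insert t ((ju : Int) + 1)).get? v = some dd ↔
          pvBase board rows cols s k v dd ∨
          (pvMin board rows cols s v (k + 1) ∧ dd = (k : Int) + 1 ∧ (Q v ∨ t = v)) := by
        intro v dd
        rw [PySem.Dict.get?_insert]
        by_cases hvt : v = t
        · subst hvt
          rw [if_pos rfl]
          constructor
          · intro h
            have hdd : dd = (k : Int) + 1 := by
              have := Option.some.inj h; omega
            exact Or.inr ⟨hjtk ▸ hmt, hdd, Or.inr rfl⟩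
          · rintro (⟨j0, hj0, hm0, hv0⟩ | ⟨_, h2, _⟩)
            · have : j0 = jt := pvMin_unique board rows cols s hm0 hmt
              omega
            · rw [h2, hdu]
        · rw [if_neg hvt]
          rw [hinv v dd]
          constructor
          · rintro (h | ⟨h1, h2, h3⟩)
            · exact Or.inl h
            · exact Or.inr ⟨h1, h2, Or.inl h3⟩
          · rintro (h | ⟨h1, h2, hq | hteq⟩)
            · exact Or.inl h
            · exact Or.inr ⟨h1, h2, hq⟩
            · exact absurd hteq.symm hvt
      obtain ⟨r1, r2⟩ := ih u ju (new.insert t ((ju : Int) + 1)) (fun v => Q v ∨ t = v)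
        (fun d' hd' => hds d' (List.mem_cons_of_mem d hd')) hmu hju hinv1
        (PySem.Dict.nodup_keys_insert new t ((ju : Int) + 1) hnd)
      refine ⟨fun v dd => (r1 v dd).trans ?_, r2⟩
      constructor
      · rintro (h | ⟨h1, h2, (hq | ht') | ⟨d', hd', hs'⟩⟩)
        · exact Or.inl h
        · exact Or.inr ⟨h1, h2, Or.inl hq⟩
        · refine Or.inr ⟨h1, h2, Or.inr ⟨d, List.mem_cons_self, ?_⟩⟩
          rw [← htdef]; exact ht'
        · exact Or.inr ⟨h1, h2, Or.inr ⟨d', List.mem_cons_of_mem d hd', hs'⟩⟩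
      · rintro (h | ⟨h1, h2, hq | ⟨d', hd', hs'⟩⟩)
        · exact Or.inl h
        · exact Or.inr ⟨h1, h2, Or.inl (Or.inl hq)⟩
        · rcases List.mem_cons.mp hd' with rfl | hd''
          · refine Or.inr ⟨h1, h2, Or.inl (Or.inr ?_)⟩
            rw [htdef]; exact hs'
          · exact Or.inr ⟨h1, h2, Or.inr ⟨d', hd'', hs'⟩⟩


lemma pv_items_inv (board : List String) (rows cols : Int) (s : Int × Int) (k : Nat) :
    ∀ (L : List ((Int × Int) × Int)) (new : PySem.Dict (Int × Int) Int)
      (Q : (Int × Int) → Prop),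
      (∀ p ∈ L, ∃ j : Nat, j ≤ k ∧ pvMin board rows cols s p.1 j ∧ p.2 = (j : Int)) →
      (∀ v dd, new.get? v = some dd ↔
        pvBase board rows cols s k v dd ∨
        (pvMin board rows cols s v (k + 1) ∧ dd = (k : Int) + 1 ∧ Q v)) →
      new.keys.Nodup →
      (∀ v dd,
        (L.foldl (fun nw p => pvDirs.foldl (pvRelax board rows cols p.1 p.2) nw) new).get? v
            = some dd ↔
          pvBase board rows cols s k v dd ∨
          (pvMin board rows cols s v (k + 1) ∧ dd = (k : Int) + 1 ∧
            (Q v ∨ ∃ p ∈ L, v ∈ pvNbr board rows cols p.1))) ∧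
      (L.foldl (fun nw p => pvDirs.foldl (pvRelax board rows cols p.1 p.2) nw) new).keys.Nodup := by
  intro L
  induction L with
  | nil =>
    intro new Q hL hinv hnd
    simp only [List.foldl_nil]
    refine ⟨fun v dd => (hinv v dd).trans (by simp), hnd⟩
  | cons p L ih =>
    intro new Q hL hinv hnd
    simp only [List.foldl_cons]
    obtain ⟨ju, hju, hmu, hp2⟩ := hL p (List.mem_cons_self)
    rw [hp2]
    obtain ⟨r1, r2⟩ := pv_relax_inv board rows cols s k pvDirs p.1 ju new Q
      (fun d hd => hd) hmu hju hinv hnd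
    have r1' : ∀ v dd,
        (pvDirs.foldl (pvRelax board rows cols p.1 (ju : Int)) new).get? v = some dd ↔
          pvBase board rows cols s k v dd ∨
          (pvMin board rows cols s v (k + 1) ∧ dd = (k : Int) + 1 ∧
            (Q v ∨ v ∈ pvNbr board rows cols p.1)) := by
      intro v dd
      rw [r1 v dd]
      have hn : (∃ d ∈ pvDirs,
          pvSlide board rows cols d.1 d.2 ((rows + cols).toNat) p.1 = v) ↔
            v ∈ pvNbr board rows cols p.1 := by
        unfold pvNbr; rw [List.mem_map]
      rw [hn]
    have hL' : ∀ p' ∈ L, ∃ j : Nat, j ≤ k ∧ pvMin board rows cols s p'.1 j ∧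
        p'.2 = (j : Int) := fun p' hp' => hL p' (List.mem_cons_of_mem p hp')
    obtain ⟨q1, q2⟩ := ih (pvDirs.foldl (pvRelax board rows cols p.1 (ju : Int)) new)
      (fun v => Q v ∨ v ∈ pvNbr board rows cols p.1) hL' r1' r2
    refine ⟨fun v dd => (q1 v dd).trans ?_, q2⟩
    constructor
    · rintro (h | ⟨h1, h2, (hq | hn) | ⟨p', hp', hn'⟩⟩)
      · exact Or.inl h
      · exact Or.inr ⟨h1, h2, Or.inl hq⟩
      · exact Or.inr ⟨h1, h2, Or.inr ⟨p, List.mem_cons_self, hn⟩⟩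
      · exact Or.inr ⟨h1, h2, Or.inr ⟨p', List.mem_cons_of_mem p hp', hn'⟩⟩
    · rintro (h | ⟨h1, h2, hq | ⟨p', hp', hn'⟩⟩)
      · exact Or.inl h
      · exact Or.inr ⟨h1, h2, Or.inl (Or.inl hq)⟩
      · rcases List.mem_cons.mp hp' with rfl | hp''
        · exact Or.inr ⟨h1, h2, Or.inl (Or.inr hn')⟩
        · exact Or.inr ⟨h1, h2, Or.inr ⟨p', hp'', hn'⟩⟩

lemma pv_round_table (board : List String) (rows cols : Int) (s : Int × Int) (k : Nat)
    (dist : PySem.Dict (Int × Int) Int)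
    (ht : pvTable board rows cols s k dist) (hnd : dist.keys.Nodup) :
    pvTable board rows cols s (k + 1) (pvRound board rows cols dist) ∧
    (pvRound board rows cols dist).keys.Nodup := by
  have hL : ∀ p ∈ dist.items, ∃ j : Nat, j ≤ k ∧ pvMin board rows cols s p.1 j ∧
      p.2 = (j : Int) := by
    rintro ⟨u, du⟩ hp
    have hget : dist.get? u = some du := PySem.Dict.get?_of_mem_items dist hp hnd
    exact (ht u du).mp hget
  have hinv0 : ∀ v dd, dist.get? v = some dd ↔
      pvBase board rows cols s k v dd ∨
      (pvMin board rows cols s v (k + 1) ∧ dd = (k : Int) + 1 ∧ False) := by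
    intro v dd
    rw [ht v dd]
    simp
  obtain ⟨q1, q2⟩ := pv_items_inv board rows cols s k dist.items dist
    (fun _ => False) hL hinv0 hnd
  refine ⟨fun v dd => ?_, q2⟩
  rw [show pvRound board rows cols dist =
      dist.items.foldl (fun nw p => pvDirs.foldl (pvRelax board rows cols p.1 p.2) nw) dist
    from rfl]
  rw [q1 v dd]
  constructor
  · rintro (⟨j, hj, hm, hdd⟩ | ⟨h1, h2, hfalse | ⟨p', hp', hn'⟩⟩)
    · exact ⟨j, Nat.le_succ_of_le hj, hm, hdd⟩
    · exact hfalse.elim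
    · refine ⟨k + 1, le_refl _, h1, ?_⟩
      rw [h2]; push_cast; ring
  · rintro ⟨j, hj, hm, hdd⟩
    rcases Nat.lt_succ_iff_lt_or_eq.mp (Nat.lt_succ_of_le hj) with h | h
    · exact Or.inl ⟨j, by omega, hm, hdd⟩
    · subst h
      refine Or.inr ⟨hm, by rw [hdd]; push_cast; ring, Or.inr ?_⟩
      have hv1 := hm.1
      rw [pvR] at hv1
      rcases Finset.mem_union.mp hv1 with h | h
      · exact absurd h (hm.2 k (Nat.lt_succ_self k))
      · obtain ⟨u, hu, hvn⟩ := Finset.mem_biUnion.mp h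
        obtain ⟨ju, hju, hmu⟩ := pvMin_exists board rows cols s hu
        have hgetu : dist.get? u = some (ju : Int) :=
          (ht u (ju : Int)).mpr ⟨ju, hju, hmu, rfl⟩
        exact ⟨(u, (ju : Int)), PySem.Dict.mem_items_of_get?_eq_some dist hgetu,
          List.mem_toFinset.mp hvn⟩

lemma pv_table_mem (board : List String) (rows cols : Int) (s : Int × Int) (k : Nat)
    (dist : PySem.Dict (Int × Int) Int) (ht : pvTable board rows cols s k dist) :
    ∀ v, (∃ dd, dist.get? v = some dd) ↔ v ∈ pvR board rows cols s k := by
  intro v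
  constructor
  · rintro ⟨dd, hdd⟩
    obtain ⟨j, hj, hm, _⟩ := (ht v dd).mp hdd
    exact pvR_mono board rows cols s hj hm.1
  · intro hv
    obtain ⟨j, hj, hm⟩ := pvMin_exists board rows cols s hv
    exact ⟨(j : Int), (ht v (j : Int)).mpr ⟨j, hj, hm, rfl⟩⟩

lemma pv_table_size (board : List String) (rows cols : Int) (s : Int × Int) (k : Nat)
    (dist : PySem.Dict (Int × Int) Int) (ht : pvTable board rows cols s k dist)
    (hnd : dist.keys.Nodup) :
    dist.size = (pvR board rows cols s k).card := by
  have hkeys : dist.keys.toFinset = pvR board rows cols s k := by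
    ext v
    rw [List.mem_toFinset, ← pv_table_mem board rows cols s k dist ht v]
    constructor
    · intro hv
      rcases h : dist.get? v with _ | dd
      · exact absurd hv ((PySem.Dict.get?_eq_none_iff_not_mem_keys _ _).mp h)
      · exact ⟨dd, rfl⟩
    · rintro ⟨dd, hdd⟩
      by_contra hv
      rw [(PySem.Dict.get?_eq_none_iff_not_mem_keys _ _).mpr hv] at hdd
      simp at hdd
  have h1 : dist.keys.length = dist.size := by
    simp [PySem.Dict.keys, PySem.Dict.size]
  rw [← h1, ← List.toFinset_card_of_nodup hnd, hkeys]

lemma pvLoopBF_succ (board : List String) (rows cols : Int) (goal : Option (Int × Int))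
    (f : Nat) (dist : PySem.Dict (Int × Int) Int) :
    pvLoopBF board rows cols goal (f + 1) dist =
      if (pvRound board rows cols dist).size = dist.size then
        match goal with
        | none => -1
        | some g => (pvRound board rows cols dist).getD g (-1)
      else pvLoopBF board rows cols goal f (pvRound board rows cols dist) := by
  rw [pvLoopBF.eq_def]

lemma pv_loopBF_ans (board : List String) (rows cols : Int) (goal : Option (Int × Int))
    (s : Int × Int) (hs : pvInGrid rows cols s) :
    ∀ (f k : Nat) (dist : PySem.Dict (Int × Int) Int),
      pvTable board rows cols s k dist → dist.keys.Nodup →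
      rows.toNat * cols.toNat + 2 ≤ f + (pvR board rows cols s k).card →
      k + 1 ≤ (pvR board rows cols s k).card →
      pvLoopBF board rows cols goal f dist = pvAns board rows cols s goal := by
  intro f
  induction f with
  | zero =>
    intro k dist ht hnd hf hk
    have := pvR_card_le board rows cols s hs k
    omega
  | succ f ih =>
    intro k dist ht hnd hf hk
    obtain ⟨ht', hnd'⟩ := pv_round_table board rows cols s k dist ht hnd
    have hsz1 : dist.size = (pvR board rows cols s k).card :=
      pv_table_size board rows cols s k dist ht hnd
    have hsz2 : (pvRound board rows cols dist).size =
        (pvR board rows cols s (k + 1)).card :=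
      pv_table_size board rows cols s (k + 1) _ ht' hnd'
    rw [pvLoopBF_succ]
    by_cases hsz : (pvRound board rows cols dist).size = dist.size
    · rw [if_pos hsz]
      have heq : pvR board rows cols s (k + 1) = pvR board rows cols s k := by
        refine (Finset.eq_of_subset_of_card_le (pvR_mono_succ board rows cols s k) ?_).symm
        omega
      have hstable := pvR_stable board rows cols s heq
      cases goal with
      | none => rfl
      | some g =>
        by_cases hg : g ∈ pvR board rows cols s k
        · obtain ⟨j, hj, hm⟩ := pvMin_exists board rows cols s hg
          have hget : (pvRound board rows cols dist).get? g = some (j : Int) :=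
            (ht' g (j : Int)).mpr ⟨j, by omega, hm, rfl⟩
          simp only []
          rw [PySem.Dict.getD_of_get?_eq_some _ _ hget]
          have hjG : j < rows.toNat * cols.toNat + 2 := by
            have := pvR_card_le board rows cols s hs k
            omega
          exact (pv_ans_found board rows cols s (some g) j g rfl hm.1 hm.2 hjG).symm
        · have hgall : ∀ i, g ∉ pvR board rows cols s i := fun i hi => hg (hstable i hi)
          have hget : (pvRound board rows cols dist).get? g = none := by
            rcases h : (pvRound board rows cols dist).get? g with _ | dd
            · rfl
            · obtain ⟨j, _, hm, _⟩ := (ht' g dd).mp h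
              exact absurd hm.1 (hgall j)
          simp only []
          rw [PySem.Dict.getD_of_get?_eq_none _ _ hget]
          have hnone : (List.range (rows.toNat * cols.toNat + 2)).find?
              (fun i => decide (g ∈ pvR board rows cols s i)) = none := by
            refine List.find?_eq_none.mpr (fun i _ => ?_)
            simp only [decide_eq_true_eq]
            exact hgall i
          simp [pvAns, hnone]
    · rw [if_neg hsz]
      have hlt : (pvR board rows cols s k).card < (pvR board rows cols s (k + 1)).card := by
        have hle := Finset.card_le_card (pvR_mono_succ board rows cols s k)
        omega
      exact ih (k + 1) (pvRound board rows cols dist) ht' hnd' (by omega) (by omega)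

lemma pv_table_init (board : List String) (rows cols : Int) (p : Int × Int) :
    pvTable board rows cols p 0 (PySem.Dict.ofList [(p, 0)]) := by
  intro v dd
  have hof : (PySem.Dict.ofList [(p, (0 : Int))]) = PySem.Dict.empty.insert p 0 := rfl
  rw [hof, PySem.Dict.get?_insert]
  have hR0 : pvR board rows cols p 0 = {p} := by rw [pvR]
  by_cases hv : v = p
  · subst hv
    rw [if_pos rfl]
    constructor
    · intro h
      refine ⟨0, le_refl 0, ⟨?_, fun i hi => absurd hi (Nat.not_lt_zero i)⟩, ?_⟩
      · rw [hR0]; exact Finset.mem_singleton_self v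
      · have := Option.some.inj h; omega
    · rintro ⟨j, hj, _, hdd⟩
      have : j = 0 := Nat.le_zero.mp hj
      subst this
      rw [hdd]
      simp
  · rw [if_neg hv, PySem.Dict.get?_empty]
    constructor
    · intro h; simp at h
    · rintro ⟨j, hj, hm, _⟩
      have : j = 0 := Nat.le_zero.mp hj
      subst this
      have := hm.1
      rw [hR0, Finset.mem_singleton] at this
      exact absurd this hv

-- ===== VERDICT (by name: the statement is the Claim_ definition above) =====
theorem solution_spec : Claim_equal_solution := by
  intro board _ hpre
  unfold Pre_solution at hpre
  unfold Spec_solution solution solution_alt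
  cases h0 : PySem.List.pyGet? board 0 with
  | none => simp
  | some row0 =>
    simp only
    cases hs : (pvScan board (board.length : Int) (PySem.Str.len row0 : Int)).1 with
    | none =>
      exfalso
      obtain ⟨hne, hlen, t, htmem, hR⟩ := hpre
      have hrow0 : row0 = board.headI := by
        cases board with
        | nil => simp [PySem.List.pyGet?, PySem.List.pyIdx?] at h0
        | cons b0 bs =>
          simp [PySem.List.pyGet?, PySem.List.pyIdx?] at h0
          simpa [List.headI] using h0.symm
      obtain ⟨j, hjlt, hjget⟩ := List.getElem_of_mem hR
      have hjb : j < board.headI.toList.length ∧ j < t.toList.length := by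
        rw [List.length_take] at hjlt
        exact ⟨by omega, by omega⟩
      rw [List.getElem_take] at hjget
      obtain ⟨i, hilt, higet⟩ := List.getElem_of_mem htmem
      have hchar : pvCharAt board (i : Int) (j : Int) = some 'R' := by
        unfold pvCharAt
        rw [PySem.List.pyGet?_natCast]
        simp only [List.getElem?_eq_getElem hilt, higet, Option.bind_some]
        rw [PySem.Str.pyGet?_natCast]
        simp [List.getElem?_eq_getElem hjb.2, hjget]
      have hsome := pv_scan_hit board (board.length : Int) (PySem.Str.len row0 : Int)
        (i : Int) (j : Int) (by omega) (by exact_mod_cast hilt) (by omega) ?_ hchar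
      · rw [hs] at hsome; simp at hsome
      · have : j < row0.toList.length := by rw [hrow0]; exact hjb.1
        have hlen0 : (PySem.Str.len row0 : Int) = (row0.toList.length : Int) := by
          simp [PySem.Str.len_eq]
        rw [hlen0]
        exact_mod_cast this
    | some s =>
      simp only
      have hsg := pv_scan_inGrid board (board.length : Int) (PySem.Str.len row0 : Int) s hs
      have hseta : ((s.1, s.2) : Int × Int) = s := rfl
      set rows : Int := (board.length : Int) with hrows
      set cols : Int := (PySem.Str.len row0 : Int) with hcols
      set goal := (pvScan board rows cols).2 with hgoal
      have h1 : 1 ≤ rows.toNat := by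
        have := hsg.1; have := hsg.2.1; omega
      have h2 : 1 ≤ cols.toNat := by
        have := hsg.2.2.1; have := hsg.2.2.2; omega
      have hG1 : 1 ≤ rows.toNat * cols.toNat := Nat.mul_pos h1 h2
      have hadd : PySem.Set.add PySem.Set.empty (s.1, s.2) = [(s.1, s.2)] := by
        rw [PySem.Set.add_eq_ite]; simp [PySem.Set.empty]
      rw [hadd]
      have hgridlist : ∀ c ∈ [((s.1, s.2) : Int × Int)], pvInGrid rows cols c := by
        intro c hc; simp only [List.mem_singleton] at hc; subst hc; exact hsg
      -- A-side: queue BFS = level BFS = answer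
      have hA : pvLoopA board rows cols goal (2 * (rows.toNat * cols.toNat) + 1)
          [(s.1, s.2, 0)] [(s.1, s.2)] = pvAns board rows cols (s.1, s.2) goal := by
        rw [show [((s.1 : Int), (s.2 : Int), (0 : Int))] =
            ([((s.1, s.2) : Int × Int)]).map (pvTri 0) from by simp [pvTri]]
        rw [pv_main board rows cols goal (rows.toNat * cols.toNat + 1) [(s.1, s.2)]
          [(s.1, s.2)] 0 (2 * (rows.toNat * cols.toNat) + 1) (by simp) hgridlist hgridlist
          (by simp only [List.length_cons, List.length_nil]; omega)
          (by simp only [List.length_cons, List.length_nil]; omega)]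
        have := pv_levelBFS_ans board rows cols goal (s.1, s.2) hsg
          (rows.toNat * cols.toNat + 1) 0 [(s.1, s.2)] [(s.1, s.2)]
          (by simp) hgridlist hgridlist
          (by rw [pvR, pvPrevR]; simp)
          (by rw [pvR]; simp)
          (by intro j hj; omega)
          (by intro _; simp)
          (by intro _; simp only [List.length_cons, List.length_nil]; omega)
        simpa using this
      -- B-side: Bellman-Ford fixpoint = answer
      have hB : pvLoopBF board rows cols goal (rows.toNat * cols.toNat + 2)
          (PySem.Dict.ofList [((s.1, s.2), 0)]) = pvAns board rows cols (s.1, s.2) goal := by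
        refine pv_loopBF_ans board rows cols goal (s.1, s.2) hsg
          (rows.toNat * cols.toNat + 2) 0 _ (pv_table_init board rows cols (s.1, s.2)) ?_ ?_ ?_
        · exact PySem.Dict.nodup_keys_insert _ _ _ PySem.Dict.nodup_keys_empty
        · have : (pvR board rows cols (s.1, s.2) 0).card = 1 := by rw [pvR]; simp
          omega
        · have : (pvR board rows cols (s.1, s.2) 0).card = 1 := by rw [pvR]; simp
          omega
      rw [hA, hB]
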